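-- pv_equiv track=rewrite | github.com/yellow-binary-tree/MMDuet | test/evaluate.py | keep_longest_true_span
-- ===== SOURCE A (Python) =====
-- def keep_longest_true_span(boolean_list):
--     max_length = 0
--     current_length = 0
--     start_index = 0
--     best_start_index = -1
--     for i, value in enumerate(boolean_list):
--         if value:
--             current_length += 1
--             if current_length > max_length:
--                 max_length = current_length
--                 best_start_index = start_index
--         else:
--             current_length = 0
--             start_index = i + 1
--     result = [False] * len(boolean_list)
--     if best_start_index != -1:
--         result[best_start_index:best_start_index + max_length] = [True] * max_length
--     return result, max_length
-- ===== SOURCE B (Python) =====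
-- def keep_longest_true_span(boolean_list):
--     n = len(boolean_list)
--     # materialize every maximal True run as (start, length)
--     runs = []
--     run_start = None
--     for i, v in enumerate(boolean_list):
--         if v:
--             if run_start is None:
--                 run_start = i
--         else:
--             if run_start is not None:
--                 runs.append((run_start, i - run_start))
--             run_start = None
--     if run_start is not None:
--         runs.append((run_start, n - run_start))
--     if not runs:
--         return [False] * n, 0
--     best_start, best_len = max(runs, key=lambda r: r[1])
--     return [False] * best_start + [True] * best_len + [False] * (n - best_start - best_len), best_len
-- ===== Notes on version B (the rewrite author's own statement) =====
-- stated objective: alternative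
-- what changed: Instead of A's single pass that tracks the best span inline with four scalar accumulators, B first materializes all maximal True runs as (start, length) pairs, selects the longest with max(key=length) (leftmost on ties), and rebuilds the output by concatenating three replicated segments.
import Mathlib
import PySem

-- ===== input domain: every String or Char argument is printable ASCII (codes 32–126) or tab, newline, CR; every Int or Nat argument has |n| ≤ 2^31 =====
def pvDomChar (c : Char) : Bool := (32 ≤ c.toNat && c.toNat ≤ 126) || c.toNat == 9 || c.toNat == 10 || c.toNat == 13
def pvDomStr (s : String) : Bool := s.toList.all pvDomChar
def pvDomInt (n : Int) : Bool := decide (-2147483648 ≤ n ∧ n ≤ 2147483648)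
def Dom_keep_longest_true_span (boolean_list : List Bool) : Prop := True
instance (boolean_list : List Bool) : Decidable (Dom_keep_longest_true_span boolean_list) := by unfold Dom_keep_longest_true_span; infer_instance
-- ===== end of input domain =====

-- B re-implements the function by materializing all maximal True runs, picking the longest with
-- max(key=length) (leftmost on ties), and rebuilding the output by concatenation (objective: alternative).

-- ===== PORT A =====
-- A's loop body: state (max_length, current_length, start_index, best_start_index), element (i, value)
def aStep (st : Int × Int × Int × Int) (p : Int × Bool) : Int × Int × Int × Int :=
  match st, p with
  | (ml, cl, si, bi), (i, v) =>
    if v then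
      if cl + 1 > ml then (cl + 1, cl + 1, si, si) else (ml, cl + 1, si, bi)
    else (ml, 0, i + 1, bi)

def keep_longest_true_span (boolean_list : List Bool) : List Bool × Int :=
  let st := (PySem.List.enumerate boolean_list).foldl aStep (0, 0, 0, -1)
  let ml := st.1
  let bi := st.2.2.2
  let result := List.replicate boolean_list.length false
  -- Python slice assignment result[bi:bi+ml] = [True]*ml, ported step for step as
  -- take/replicate/drop; this is exact because A's loop guarantees 0 ≤ bi and
  -- bi + ml ≤ len(result) whenever bi ≠ -1 (the slice is fully in range)
  if bi ≠ -1 then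
    (result.take bi.toNat ++ List.replicate ml.toNat true ++ result.drop (bi.toNat + ml.toNat), ml)
  else (result, ml)

-- ===== PORT B =====
-- B's run-collection loop body: state (runs, run_start), element (i, v)
def bStep (st : List (Int × Int) × Option Int) (p : Int × Bool) :
    List (Int × Int) × Option Int :=
  match st, p with
  | (runs, rs), (i, v) =>
    if v then (runs, some (rs.getD i))
    else
      match rs with
      | some s => (runs ++ [(s, i - s)], none)
      | none => (runs, none)

def keep_longest_true_span_alt (boolean_list : List Bool) : List Bool × Int :=
  let n : Int := boolean_list.length
  let st := (PySem.List.enumerate boolean_list).foldl bStep ([], none)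
  let runs := match st.2 with
    | some s => st.1 ++ [(s, n - s)]
    | none => st.1
  match PySem.List.max? runs (fun r => r.2) with
  | none => (List.replicate boolean_list.length false, 0)
  | some (s, m) =>
      (List.replicate s.toNat false ++ List.replicate m.toNat true ++
         List.replicate (boolean_list.length - s.toNat - m.toNat) false, m)

-- ===== PRECONDITION & SPEC =====
def Spec_keep_longest_true_span (boolean_list : List Bool) (out : List Bool × Int) : Prop := out = keep_longest_true_span_alt boolean_list
instance (boolean_list : List Bool) (out : List Bool × Int) : Decidable (Spec_keep_longest_true_span boolean_list out) := by unfold Spec_keep_longest_true_span; infer_instance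

-- ===== CLAIM (what is proved, stated in full; the proofs are below) =====
def Claim_equal_keep_longest_true_span : Prop := ∀ (boolean_list : List Bool), Dom_keep_longest_true_span boolean_list → Spec_keep_longest_true_span boolean_list (keep_longest_true_span boolean_list)

-- ===== LEMMAS AND PROOFS =====

-- "best run so far" as A maintains it: fold keeping (max_length, best_start), strict >
def bestOf (l : List (Int × Int)) : Int × Int :=
  l.foldl (fun b r => if r.2 > b.1 then (r.2, r.1) else b) (0, -1)

-- the full run list represented by B's loop state at position n (finished runs + open run)
def runsAll (st : List (Int × Int) × Option Int) (n : Int) : List (Int × Int) :=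
  match st.2 with
  | some s => st.1 ++ [(s, n - s)]
  | none => st.1

lemma bestOf_append_singleton (l : List (Int × Int)) (r : Int × Int) :
    bestOf (l ++ [r]) = if r.2 > (bestOf l).1 then (r.2, r.1) else bestOf l := by
  simp [bestOf, List.foldl_append]

-- the loop invariant tying A's scalar state to B's run list
def InvP (bl : List Bool) : Prop :=
  (PySem.List.enumerate bl).foldl aStep (0, 0, 0, -1) =
    ((bestOf (runsAll ((PySem.List.enumerate bl).foldl bStep ([], none)) (bl.length : Int))).1,
     (match ((PySem.List.enumerate bl).foldl bStep ([], none)).2 with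
      | some s => (bl.length : Int) - s
      | none => 0),
     (match ((PySem.List.enumerate bl).foldl bStep ([], none)).2 with
      | some s => s
      | none => (bl.length : Int)),
     (bestOf (runsAll ((PySem.List.enumerate bl).foldl bStep ([], none)) (bl.length : Int))).2)
  ∧ (∀ s, ((PySem.List.enumerate bl).foldl bStep ([], none)).2 = some s →
      0 ≤ s ∧ s < (bl.length : Int))
  ∧ (∀ r ∈ ((PySem.List.enumerate bl).foldl bStep ([], none)).1,
      0 ≤ r.1 ∧ 1 ≤ r.2 ∧ r.1 + r.2 ≤ (bl.length : Int))

lemma inv_holds (bl : List Bool) : InvP bl := by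
  induction bl using List.reverseRecOn with
  | nil => simp [InvP, PySem.List.enumerate, bestOf, runsAll]
  | append_singleton p v ih =>
    obtain ⟨hst, hrs, hruns⟩ := ih
    unfold InvP
    rw [PySem.List.enumerate_append]
    simp only [List.foldl_append]
    rw [hst]
    set bst := (PySem.List.enumerate p).foldl bStep ([], none) with hbst
    obtain ⟨runs, rs⟩ := bst
    have hn : ((p ++ [v]).length : Int) = (p.length : Int) + 1 := by simp
    simp only [PySem.List.enumerate_cons, PySem.List.enumerate_nil, List.foldl_cons,
      List.foldl_nil, hn]
    cases v with
    | true =>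
      cases rs with
      | none =>
        -- a new run [(((p.length : Int)), 1)] opens
        simp only [aStep, bStep, Option.getD, reduceIte, zero_add] at *
        have hall : runsAll (runs, some ((p.length : Int))) (((p.length : Int)) + 1) = runs ++ [(((p.length : Int)), 1)] := by
          simp [runsAll]
        have hall0 : runsAll (runs, (none : Option Int)) ((p.length : Int)) = runs := by simp [runsAll]
        rw [hall0] at *
        rw [hall, bestOf_append_singleton]
        rcases hE : bestOf runs with ⟨m0, b0⟩
        refine ⟨?_, ?_, ?_⟩
        · simp only []
          split_ifs <;> simp
        · intro s hs; injection hs with h; omega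
        · intro r hr; have := hruns r hr; omega
      | some s =>
        -- the open run grows by one
        obtain ⟨hs0, hsn⟩ := hrs s rfl
        simp only [aStep, bStep, Option.getD, reduceIte, zero_add] at *
        have hall : runsAll (runs, some s) (((p.length : Int)) + 1) = runs ++ [(s, ((p.length : Int)) + 1 - s)] := by
          simp [runsAll]
        have hall2 : runsAll (runs, some s) ((p.length : Int)) = runs ++ [(s, ((p.length : Int)) - s)] := by
          simp [runsAll]
        rw [hall2] at *
        rw [hall, bestOf_append_singleton, bestOf_append_singleton]
        rcases hE : bestOf runs with ⟨m0, b0⟩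
        refine ⟨?_, ?_, ?_⟩
        · simp only []
          by_cases h1 : ((p.length : Int)) - s > m0 <;>
            by_cases h2 : ((p.length : Int)) + 1 - s > m0 <;>
              simp [h1, h2] <;> (try split_ifs) <;> (try simp [Prod.mk.injEq]) <;> (try omega) <;> (try (refine ⟨?_, ?_, ?_⟩)) <;> (try linarith)
        · intro s' hs'; injection hs' with h; omega
        · intro r hr; have := hruns r hr; omega
    | false =>
      cases rs with
      | none =>
        simp only [aStep, bStep, Option.getD, Bool.false_eq_true, if_false, zero_add] at *
        have hall0 : ∀ m : Int, runsAll (runs, (none : Option Int)) m = runs := by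
          intro m; simp [runsAll]
        rw [hall0] at *
        rw [hall0]
        refine ⟨rfl, ?_, ?_⟩
        · intro s hs; cases hs
        · intro r hr; have := hruns r hr; omega
      | some s =>
        -- the open run closes
        obtain ⟨hs0, hsn⟩ := hrs s rfl
        simp only [aStep, bStep, Option.getD, Bool.false_eq_true, if_false, zero_add] at *
        have hall : runsAll (runs ++ [(s, ((p.length : Int)) - s)], (none : Option Int)) (((p.length : Int)) + 1) =
            runs ++ [(s, ((p.length : Int)) - s)] := by simp [runsAll]
        have hall2 : runsAll (runs, some s) ((p.length : Int)) = runs ++ [(s, ((p.length : Int)) - s)] := by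
          simp [runsAll]
        rw [hall2] at *
        rw [hall]
        refine ⟨rfl, ?_, ?_⟩
        · intro s' hs'; cases hs'
        · intro r hr
          rcases List.mem_append.1 hr with h | h
          · have := hruns r h; omega
          · simp at h
            subst h
            simp only []
            omega

-- bestOf equals Python's max(runs, key=length) (first maximum) when every run is nonempty
lemma bestOf_max_aux (f : Option (Int × Int) → (Int × Int) → Option (Int × Int))
    (hf : ∀ m x, f (some m) x = if m.2 < x.2 then some x else some m) :
    ∀ (t : List (Int × Int)) (r q : Int × Int),
      t.foldl f (some r) = some q →
      t.foldl (fun b x => if x.2 > b.1 then (x.2, x.1) else b) (r.2, r.1) = (q.2, q.1) := by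
  intro t
  induction t with
  | nil =>
    intro r q h
    simp only [List.foldl_nil] at h ⊢
    cases h
    rfl
  | cons x t ih =>
    intro r q h
    rw [List.foldl_cons, hf] at h
    rw [List.foldl_cons]
    by_cases hc : r.2 < x.2
    · rw [if_pos hc] at h
      have hc' : x.2 > r.2 := hc
      rw [if_pos hc']
      exact ih x q h
    · rw [if_neg hc] at h
      have hc' : ¬ x.2 > r.2 := hc
      rw [if_neg hc']
      exact ih r q h

-- ===== VERDICT (by name: the statement is the Claim_ definition above) =====
theorem keep_longest_true_span_spec : Claim_equal_keep_longest_true_span := by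
  intro bl _
  unfold Spec_keep_longest_true_span
  obtain ⟨hst, hrs, hruns⟩ := inv_holds bl
  unfold keep_longest_true_span keep_longest_true_span_alt
  simp only []
  rw [hst]
  set bst := (PySem.List.enumerate bl).foldl bStep ([], none) with hbst
  set n : Int := (bl.length : Int) with hdefn
  have hfull : (match bst.2 with
      | some s => bst.1 ++ [(s, n - s)]
      | none => bst.1) = runsAll bst n := rfl
  rw [hfull]
  set full := runsAll bst n with hfulldef
  clear_value n
  have hposfull : ∀ r ∈ full, 0 ≤ r.1 ∧ 1 ≤ r.2 ∧ r.1 + r.2 ≤ n := by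
    intro r hr
    cases hcase : bst.2 with
    | none =>
      rw [hfulldef] at hr; simp only [runsAll, hcase] at hr
      exact hruns r hr
    | some s =>
      obtain ⟨hs0, hsn⟩ := hrs s hcase
      rw [hfulldef] at hr; simp only [runsAll, hcase] at hr
      rcases List.mem_append.1 hr with h | h
      · exact hruns r h
      · simp at h
        subst h
        simp only []
        omega
  clear_value full
  cases hmax : PySem.List.max? full (fun r => r.2) with
  | none =>
    have hfe : full = [] := (PySem.List.max?_eq_none_iff full (fun r => r.2)).mp hmax
    subst hfe
    simp [bestOf]
  | some q =>
    obtain ⟨s, m⟩ := q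
    have hb : bestOf full = (m, s) := by
      rcases full with _ | ⟨r, t⟩
      · exact absurd hmax (by simp [PySem.List.max?])
      · have hr1 : (1 : Int) ≤ r.2 := (hposfull r (List.mem_cons_self ..)).2.1
        have h1 : bestOf (r :: t) =
            t.foldl (fun b x => if x.2 > b.1 then (x.2, x.1) else b) (r.2, r.1) := by
          show t.foldl _ (if r.2 > (0 : Int) then (r.2, r.1) else ((0 : Int), (-1 : Int))) = _
          rw [if_pos (by linarith)]
        rw [h1]
        have hm2 := hmax
        simp only [PySem.List.max?, List.foldl_cons] at hm2
        exact bestOf_max_aux _ (fun m x => rfl) t r (s, m) hm2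
    have hq := hposfull (s, m) (PySem.List.max?_mem hmax)
    simp only [] at hq
    obtain ⟨h0, h1, h2⟩ := hq
    rw [hb]
    simp only []
    rw [if_pos (show ¬ (s = -1) by intro hEq; rw [hEq] at h0; norm_num at h0)]
    have hsn : s.toNat ≤ bl.length := by omega
    have hsm : s.toNat + m.toNat ≤ bl.length := by omega
    congr 1
    rw [List.take_replicate, List.drop_replicate]
    have e1 : min s.toNat bl.length = s.toNat := by omega
    have e2 : bl.length - (s.toNat + m.toNat) = bl.length - s.toNat - m.toNat := by omega
    rw [e1, e2]
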